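-- pv_equiv track=rewrite | github.com/dorahee/multiple-scheduling-2.0 | household_scheduling.py | data_preprocessing
-- ===== SOURCE A (Python) =====
-- def data_preprocessing(num_intervals, num_tasks, prices_day, earliest_starts, latest_ends, durations,
--                        preferred_starts, care_factors, demands, cf_weight, cf_max):
--     max_demand = max(demands)
--     max_duration = max(durations)
--     run_costs = []
--     big_cost = (num_intervals * cf_max * max_demand + max_demand * max_duration)
--     for i in range(num_tasks):
--         demand = demands[i]
--         pstart = preferred_starts[i]
--         estart = earliest_starts[i]
--         lfinish = latest_ends[i]
--         duration = durations[i]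
--         cfactor = care_factors[i]
--
--         run_cost_task = []
--         for t in range(num_intervals):
--             if estart <= t <= lfinish - duration + 1:
--                 rc = abs(t - pstart) * cfactor * cf_weight
--                 rc += sum([prices_day[j % num_intervals] for j in range(t, t + duration)]) * demand
--             else:
--                 rc = big_cost
--             run_cost_task.append(int(rc))
--         run_costs.append(run_cost_task)
--     return run_costs
-- ===== SOURCE B (Python) =====
-- def data_preprocessing(num_intervals, num_tasks, prices_day, earliest_starts, latest_ends, durations,
--                        preferred_starts, care_factors, demands, cf_weight, cf_max):
--     """Sliding-window re-implementation: the first window price sum is computed in O(n) from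
--     divmod(duration, n) and one period sum, then slid across intervals with an O(1) update."""
--     max_demand = max(demands)
--     max_duration = max(durations)
--     big_cost = num_intervals * cf_max * max_demand + max_demand * max_duration
--     n = num_intervals
--
--     def row(i):
--         demand = demands[i]
--         pstart = preferred_starts[i]
--         estart = earliest_starts[i]
--         duration = durations[i]
--         hi = latest_ends[i] - duration + 1
--         cfactor = care_factors[i]
--         if duration > 0 and n > 0:
--             q, r = divmod(duration, n)
--             wsum = q * sum(prices_day[j] for j in range(n)) + sum(prices_day[j] for j in range(r))
--         else:
--             wsum = 0
--         out = []
--         t = 0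
--         while t < n:
--             if estart <= t <= hi:
--                 out.append(abs(t - pstart) * cfactor * cf_weight + wsum * demand)
--             else:
--                 out.append(big_cost)
--             if duration > 0:
--                 wsum += prices_day[(t + duration) % n] - prices_day[t % n]
--             t += 1
--         return out
--
--     return [row(i) for i in range(num_tasks)]
-- ===== Notes on version B (the rewrite author's own statement) =====
-- stated objective: faster
-- what changed: Instead of re-summing the whole duration-long price window for every interval, B computes the first window sum via divmod(duration, n) plus one period sum and slides it across intervals with an O(1) update; intended as faster (measured 4-22x at the sizes where both finish; unconfirmed at the largest probe size, where A times out).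
-- outside the precondition, e.g. on data_preprocessing(2, 1, [5], [3], [0], [1], [0], [1], [1], 1, 1): A returns [[3, 3]], B raises IndexError
import Mathlib
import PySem

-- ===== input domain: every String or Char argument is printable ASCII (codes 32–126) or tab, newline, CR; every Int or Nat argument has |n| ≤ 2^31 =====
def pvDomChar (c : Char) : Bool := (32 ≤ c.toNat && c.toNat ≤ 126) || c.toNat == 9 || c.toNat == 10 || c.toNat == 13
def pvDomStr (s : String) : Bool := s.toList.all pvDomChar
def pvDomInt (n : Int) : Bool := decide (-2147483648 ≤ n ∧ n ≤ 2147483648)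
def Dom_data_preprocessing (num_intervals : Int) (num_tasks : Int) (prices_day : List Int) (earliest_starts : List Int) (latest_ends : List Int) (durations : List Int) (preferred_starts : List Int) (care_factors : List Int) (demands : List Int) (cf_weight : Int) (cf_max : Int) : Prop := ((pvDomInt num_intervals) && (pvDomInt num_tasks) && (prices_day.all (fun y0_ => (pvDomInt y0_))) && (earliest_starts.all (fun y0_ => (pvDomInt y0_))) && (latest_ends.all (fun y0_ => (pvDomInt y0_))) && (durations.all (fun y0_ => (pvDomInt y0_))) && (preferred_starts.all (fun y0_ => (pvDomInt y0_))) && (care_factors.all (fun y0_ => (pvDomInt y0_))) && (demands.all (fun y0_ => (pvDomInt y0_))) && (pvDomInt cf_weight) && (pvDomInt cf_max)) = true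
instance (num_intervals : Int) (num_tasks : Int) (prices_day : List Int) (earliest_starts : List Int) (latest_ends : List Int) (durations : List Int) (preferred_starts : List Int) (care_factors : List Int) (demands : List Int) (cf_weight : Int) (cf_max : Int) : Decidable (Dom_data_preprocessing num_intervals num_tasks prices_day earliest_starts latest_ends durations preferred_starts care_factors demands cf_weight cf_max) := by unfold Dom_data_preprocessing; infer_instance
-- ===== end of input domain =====

-- B replaces A's per-interval O(duration) window re-summation: the first window sum comes from
-- divmod(duration, n) and one period sum, then slides across intervals with an O(1) update
-- (objective: faster; intended as faster — measured 4-22x at the probe sizes both finish).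

-- ===== PORT A =====
-- prices_day[x % num_intervals]; IndexError (pyGetD default never used) is excluded by Pre_.
def pvG (prices : List Int) (n x : Int) : Int :=
  PySem.List.pyGetD prices (PySem.Int.mod x n) 0

def data_preprocessing (num_intervals : Int) (num_tasks : Int) (prices_day : List Int) (earliest_starts : List Int) (latest_ends : List Int) (durations : List Int) (preferred_starts : List Int) (care_factors : List Int) (demands : List Int) (cf_weight : Int) (cf_max : Int) : List (List Int) :=
  let max_demand := (PySem.List.max? demands (fun y => y)).getD 0      -- max(demands); [] excluded by Pre_
  let max_duration := (PySem.List.max? durations (fun y => y)).getD 0  -- max(durations); [] excluded by Pre_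
  let big_cost := num_intervals * cf_max * max_demand + max_demand * max_duration
  (PySem.List.pyRange 0 num_tasks 1).foldl (fun run_costs i =>
    let demand := PySem.List.pyGetD demands i 0
    let pstart := PySem.List.pyGetD preferred_starts i 0
    let estart := PySem.List.pyGetD earliest_starts i 0
    let lfinish := PySem.List.pyGetD latest_ends i 0
    let duration := PySem.List.pyGetD durations i 0
    let cfactor := PySem.List.pyGetD care_factors i 0
    let run_cost_task := (PySem.List.pyRange 0 num_intervals 1).foldl (fun acc t =>
      let rc : Int :=
        if estart ≤ t ∧ t ≤ lfinish - duration + 1 then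
          |t - pstart| * cfactor * cf_weight +
            ((PySem.List.pyRange t (t + duration) 1).map (fun j => pvG prices_day num_intervals j)).sum * demand
        else big_cost
      acc ++ [rc]) ([] : List Int)
    run_costs ++ [run_cost_task]) ([] : List (List Int))

-- ===== PORT B =====
-- the 'while t < n' loop of Source B's row(): fuel cnt = number of remaining intervals
def pvBRow (prices : List Int) (n estart hi pstart cfactor cfw demand big duration : Int) :
    Nat → Int → Int → List Int
  | 0, _, _ => []
  | Nat.succ cnt, t, wsum =>
    (if estart ≤ t ∧ t ≤ hi then |t - pstart| * cfactor * cfw + wsum * demand else big) ::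
      pvBRow prices n estart hi pstart cfactor cfw demand big duration cnt (t + 1)
        (if 0 < duration then wsum + pvG prices n (t + duration) - pvG prices n t else wsum)

def data_preprocessing_alt (num_intervals : Int) (num_tasks : Int) (prices_day : List Int) (earliest_starts : List Int) (latest_ends : List Int) (durations : List Int) (preferred_starts : List Int) (care_factors : List Int) (demands : List Int) (cf_weight : Int) (cf_max : Int) : List (List Int) :=
  let max_demand := (PySem.List.max? demands (fun y => y)).getD 0
  let max_duration := (PySem.List.max? durations (fun y => y)).getD 0
  let big_cost := num_intervals * cf_max * max_demand + max_demand * max_duration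
  (PySem.List.pyRange 0 num_tasks 1).map (fun i =>
    let demand := PySem.List.pyGetD demands i 0
    let pstart := PySem.List.pyGetD preferred_starts i 0
    let estart := PySem.List.pyGetD earliest_starts i 0
    let duration := PySem.List.pyGetD durations i 0
    let hi := PySem.List.pyGetD latest_ends i 0 - duration + 1
    let cfactor := PySem.List.pyGetD care_factors i 0
    let w0 : Int :=
      if 0 < duration ∧ 0 < num_intervals then
        PySem.Int.floordiv duration num_intervals *
            ((PySem.List.pyRange 0 num_intervals 1).map
              (fun j => PySem.List.pyGetD prices_day j 0)).sum +
          ((PySem.List.pyRange 0 (PySem.Int.mod duration num_intervals) 1).map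
            (fun j => PySem.List.pyGetD prices_day j 0)).sum
      else 0
    pvBRow prices_day num_intervals estart hi pstart cfactor cf_weight demand big_cost duration
      num_intervals.toNat 0 w0)

-- ===== PRECONDITION & SPEC =====
-- Pre_ excludes: empty demands/durations (Python max raises ValueError); task lists shorter than
-- num_tasks (IndexError); and prices_day shorter than num_intervals — there A raises IndexError
-- except when no in-window access ever happens (A then returns, but B's sliding window always
-- reads prices_day and raises; that narrowing is cited in claim.json).
def Pre_data_preprocessing (num_intervals : Int) (num_tasks : Int) (prices_day : List Int) (earliest_starts : List Int) (latest_ends : List Int) (durations : List Int) (preferred_starts : List Int) (care_factors : List Int) (demands : List Int) (cf_weight : Int) (cf_max : Int) : Prop :=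
  demands ≠ [] ∧ durations ≠ [] ∧
  (num_tasks ≤ 0 ∨
    (num_tasks ≤ (earliest_starts.length : Int) ∧ num_tasks ≤ (latest_ends.length : Int) ∧
     num_tasks ≤ (durations.length : Int) ∧ num_tasks ≤ (preferred_starts.length : Int) ∧
     num_tasks ≤ (care_factors.length : Int) ∧ num_tasks ≤ (demands.length : Int))) ∧
  (num_intervals ≤ 0 ∨ num_tasks ≤ 0 ∨ num_intervals ≤ (prices_day.length : Int))
instance (num_intervals : Int) (num_tasks : Int) (prices_day : List Int) (earliest_starts : List Int) (latest_ends : List Int) (durations : List Int) (preferred_starts : List Int) (care_factors : List Int) (demands : List Int) (cf_weight : Int) (cf_max : Int) : Decidable (Pre_data_preprocessing num_intervals num_tasks prices_day earliest_starts latest_ends durations preferred_starts care_factors demands cf_weight cf_max) := by unfold Pre_data_preprocessing; infer_instance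

def pvWitness_data_preprocessing : Int × Int × List Int × List Int × List Int × List Int × List Int × List Int × List Int × Int × Int :=
  (3, 1, [1, 2, 3], [0], [2], [2], [1], [1], [1], 1, 10)

def Spec_data_preprocessing (num_intervals : Int) (num_tasks : Int) (prices_day : List Int) (earliest_starts : List Int) (latest_ends : List Int) (durations : List Int) (preferred_starts : List Int) (care_factors : List Int) (demands : List Int) (cf_weight : Int) (cf_max : Int) (out : List (List Int)) : Prop := out = data_preprocessing_alt num_intervals num_tasks prices_day earliest_starts latest_ends durations preferred_starts care_factors demands cf_weight cf_max
instance (num_intervals : Int) (num_tasks : Int) (prices_day : List Int) (earliest_starts : List Int) (latest_ends : List Int) (durations : List Int) (preferred_starts : List Int) (care_factors : List Int) (demands : List Int) (cf_weight : Int) (cf_max : Int) (out : List (List Int)) : Decidable (Spec_data_preprocessing num_intervals num_tasks prices_day earliest_starts latest_ends durations preferred_starts care_factors demands cf_weight cf_max out) := by unfold Spec_data_preprocessing; infer_instance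

-- ===== CLAIM (what is proved, stated in full; the proofs are below) =====
def Claim_equal_data_preprocessing : Prop := ∀ (num_intervals : Int) (num_tasks : Int) (prices_day : List Int) (earliest_starts : List Int) (latest_ends : List Int) (durations : List Int) (preferred_starts : List Int) (care_factors : List Int) (demands : List Int) (cf_weight : Int) (cf_max : Int), Dom_data_preprocessing num_intervals num_tasks prices_day earliest_starts latest_ends durations preferred_starts care_factors demands cf_weight cf_max → Pre_data_preprocessing num_intervals num_tasks prices_day earliest_starts latest_ends durations preferred_starts care_factors demands cf_weight cf_max → Spec_data_preprocessing num_intervals num_tasks prices_day earliest_starts latest_ends durations preferred_starts care_factors demands cf_weight cf_max (data_preprocessing num_intervals num_tasks prices_day earliest_starts latest_ends durations preferred_starts care_factors demands cf_weight cf_max)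

-- ===== LEMMAS AND PROOFS =====

-- the window sum over [t, t+d) at the next start t+1: drop g t, add g (t+d)
lemma pv_sg_step (prices : List Int) (n t d : Int) (hd : 0 < d) :
    ((PySem.List.pyRange (t + 1) (t + 1 + d) 1).map (fun j => pvG prices n j)).sum
      = ((PySem.List.pyRange t (t + d) 1).map (fun j => pvG prices n j)).sum
        + pvG prices n (t + d) - pvG prices n t := by
  have h1 : PySem.List.pyRange t (t + d) 1 = t :: PySem.List.pyRange (t + 1) (t + d) 1 :=
    PySem.List.pyRange_one_cons (by omega)
  have h2 : PySem.List.pyRange (t + 1) (t + 1 + d) 1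
      = PySem.List.pyRange (t + 1) (t + d) 1 ++ [t + d] := by
    have := PySem.List.pyRange_one_succ_right (a := t + 1) (b := t + d) (by omega)
    rw [show t + 1 + d = t + d + 1 by ring, this]
  rw [h1, h2]
  simp [List.sum_append]
  ring

-- Source B's while loop produces exactly A's per-interval values, given the window-sum invariant
lemma pvBRow_eq_map (prices : List Int) (n estart hi pstart cfactor cfw demand big duration : Int) :
    ∀ (cnt : Nat) (t wsum : Int),
      wsum = ((PySem.List.pyRange t (t + duration) 1).map (fun j => pvG prices n j)).sum →
      pvBRow prices n estart hi pstart cfactor cfw demand big duration cnt t wsum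
        = (PySem.List.pyRange t (t + (cnt : Int)) 1).map (fun u =>
            if estart ≤ u ∧ u ≤ hi then
              |u - pstart| * cfactor * cfw +
                ((PySem.List.pyRange u (u + duration) 1).map (fun j => pvG prices n j)).sum * demand
            else big) := by
  intro cnt
  induction cnt with
  | zero =>
    intro t wsum hw
    simp [pvBRow, PySem.List.pyRange_one_eq_nil (le_refl t)]
  | succ k ih =>
    intro t wsum hw
    have hcons : PySem.List.pyRange t (t + ((k + 1 : Nat) : Int)) 1
        = t :: PySem.List.pyRange (t + 1) (t + ((k + 1 : Nat) : Int)) 1 :=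
      PySem.List.pyRange_one_cons (by push_cast; omega)
    have hend : t + ((k + 1 : Nat) : Int) = (t + 1) + (k : Int) := by push_cast; ring
    rw [hcons, hend]
    show _ :: _ = _ :: _
    congr 1
    · rw [hw]
    · have hinv : (if 0 < duration then wsum + pvG prices n (t + duration) - pvG prices n t else wsum)
          = ((PySem.List.pyRange (t + 1) (t + 1 + duration) 1).map (fun j => pvG prices n j)).sum := by
        rcases lt_or_ge 0 duration with hpos | hneg
        · rw [if_pos hpos, hw, pv_sg_step prices n t duration hpos]
        · rw [if_neg (by omega), hw,
            PySem.List.pyRange_one_eq_nil (by omega : t + duration ≤ t),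
            PySem.List.pyRange_one_eq_nil (by omega : t + 1 + duration ≤ t + 1)]
      exact ih (t + 1) _ hinv

-- pvG has period n
lemma pvG_period (prices : List Int) (n x : Int) (hn : 0 < n) :
    pvG prices n (x + n) = pvG prices n x := by
  unfold pvG
  rw [PySem.Int.mod_eq_emod_of_pos hn, PySem.Int.mod_eq_emod_of_pos hn, Int.add_emod_right]

-- a window starting one period in has the same sum
lemma pv_sg_shift (prices : List Int) (n m : Int) (hn : 0 < n) :
    ((PySem.List.pyRange n (n + m) 1).map (fun j => pvG prices n j)).sum
      = ((PySem.List.pyRange 0 m 1).map (fun j => pvG prices n j)).sum := by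
  rw [PySem.List.pyRange_one n (n + m), PySem.List.pyRange_one 0 m,
    show n + m - n = m by ring, show m - 0 = m by ring, List.map_map, List.map_map]
  congr 1
  apply List.map_congr_left
  intro k _
  show pvG prices n (n + (k : Int)) = pvG prices n (0 + (k : Int))
  rw [show n + (k : Int) = (0 + (k : Int)) + n by ring, pvG_period prices n _ hn]

-- q whole periods plus a remainder
lemma pv_sg_blocks (prices : List Int) (n : Int) (hn : 0 < n) :
    ∀ (q : Nat) (r : Int), 0 ≤ r →
      ((PySem.List.pyRange 0 ((q : Int) * n + r) 1).map (fun j => pvG prices n j)).sum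
        = (q : Int) * ((PySem.List.pyRange 0 n 1).map (fun j => pvG prices n j)).sum
          + ((PySem.List.pyRange 0 r 1).map (fun j => pvG prices n j)).sum := by
  intro q
  induction q with
  | zero => intro r _; simp
  | succ k ih =>
    intro r hr
    have hm : (0 : Int) ≤ (k : Int) * n + r := by positivity
    have harg : ((k + 1 : Nat) : Int) * n + r = n + ((k : Int) * n + r) := by push_cast; ring
    rw [harg,
      PySem.List.pyRange_one_append 0 n (n + ((k : Int) * n + r)) (by omega) (by omega),
      List.map_append, List.sum_append, pv_sg_shift prices n _ hn, ih _ hr]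
    push_cast
    ring

-- on [0, m) with m ≤ n the wrapped index is the plain index
lemma pv_direct_eq (prices : List Int) (n m : Int) (hn : 0 < n) (hmn : m ≤ n) :
    ((PySem.List.pyRange 0 m 1).map (fun j => PySem.List.pyGetD prices j 0)).sum
      = ((PySem.List.pyRange 0 m 1).map (fun j => pvG prices n j)).sum := by
  congr 1
  apply List.map_congr_left
  intro j hj
  rw [PySem.List.mem_pyRange_one] at hj
  unfold pvG
  rw [PySem.Int.mod_eq_emod_of_pos hn, Int.emod_eq_of_lt hj.1 (lt_of_lt_of_le hj.2 hmn)]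

-- B's divmod-based first window sum equals A's direct sum over [0, duration)
lemma pv_w0_eq (prices : List Int) (n d : Int) (hn : 0 < n) (hd : 0 < d) :
    PySem.Int.floordiv d n *
        ((PySem.List.pyRange 0 n 1).map (fun j => PySem.List.pyGetD prices j 0)).sum
      + ((PySem.List.pyRange 0 (PySem.Int.mod d n) 1).map
          (fun j => PySem.List.pyGetD prices j 0)).sum
      = ((PySem.List.pyRange 0 d 1).map (fun j => pvG prices n j)).sum := by
  have hr0 : 0 ≤ PySem.Int.mod d n := PySem.Int.mod_nonneg d hn
  have hrn : PySem.Int.mod d n < n := PySem.Int.mod_lt d hn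
  have hq0 : 0 ≤ PySem.Int.floordiv d n :=
    (PySem.Int.le_floordiv_iff_mul_le hn).mpr (by omega)
  have hsplit := PySem.Int.floordiv_mul_add_mod d n
  have hd_eq : d = ((PySem.Int.floordiv d n).toNat : Int) * n + PySem.Int.mod d n := by
    rw [Int.toNat_of_nonneg hq0]; omega
  rw [pv_direct_eq prices n n hn le_rfl, pv_direct_eq prices n _ hn (le_of_lt hrn)]
  calc PySem.Int.floordiv d n *
          ((PySem.List.pyRange 0 n 1).map (fun j => pvG prices n j)).sum
        + ((PySem.List.pyRange 0 (PySem.Int.mod d n) 1).map (fun j => pvG prices n j)).sum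
      = (((PySem.Int.floordiv d n).toNat : Int)) *
          ((PySem.List.pyRange 0 n 1).map (fun j => pvG prices n j)).sum
        + ((PySem.List.pyRange 0 (PySem.Int.mod d n) 1).map (fun j => pvG prices n j)).sum := by
        rw [Int.toNat_of_nonneg hq0]
    _ = ((PySem.List.pyRange 0 (((PySem.Int.floordiv d n).toNat : Int) * n + PySem.Int.mod d n) 1).map
          (fun j => pvG prices n j)).sum :=
        (pv_sg_blocks prices n hn (PySem.Int.floordiv d n).toNat (PySem.Int.mod d n) hr0).symm
    _ = ((PySem.List.pyRange 0 d 1).map (fun j => pvG prices n j)).sum := by rw [← hd_eq]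

-- one full row: A's inner loop equals B's sliding-window loop
lemma pv_row_eq (prices : List Int) (n estart lfinish pstart cfactor cfw demand big duration : Int) :
    (PySem.List.pyRange 0 n 1).foldl (fun acc t =>
        acc ++ [if estart ≤ t ∧ t ≤ lfinish - duration + 1 then
          |t - pstart| * cfactor * cfw +
            ((PySem.List.pyRange t (t + duration) 1).map (fun j => pvG prices n j)).sum * demand
          else big]) ([] : List Int)
      = pvBRow prices n estart (lfinish - duration + 1) pstart cfactor cfw demand big duration
          n.toNat 0
          (if 0 < duration ∧ 0 < n then
            PySem.Int.floordiv duration n *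
                ((PySem.List.pyRange 0 n 1).map (fun j => PySem.List.pyGetD prices j 0)).sum +
              ((PySem.List.pyRange 0 (PySem.Int.mod duration n) 1).map
                (fun j => PySem.List.pyGetD prices j 0)).sum
           else 0) := by
  rw [PySem.List.foldl_append_singleton_eq_map]
  rcases le_or_gt n 0 with hn | hn
  · have : n.toNat = 0 := by omega
    rw [this]
    simp [pvBRow, PySem.List.pyRange_one_eq_nil hn]
  · have hinv : (if 0 < duration ∧ 0 < n then
        PySem.Int.floordiv duration n *
            ((PySem.List.pyRange 0 n 1).map (fun j => PySem.List.pyGetD prices j 0)).sum +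
          ((PySem.List.pyRange 0 (PySem.Int.mod duration n) 1).map
            (fun j => PySem.List.pyGetD prices j 0)).sum
       else 0)
        = ((PySem.List.pyRange 0 (0 + duration) 1).map (fun j => pvG prices n j)).sum := by
      rcases lt_or_ge 0 duration with hd | hd
      · rw [if_pos ⟨hd, hn⟩, zero_add]
        exact pv_w0_eq prices n duration hn hd
      · rw [if_neg (by omega), PySem.List.pyRange_one_eq_nil (by omega)]
        simp
    rw [pvBRow_eq_map prices n estart (lfinish - duration + 1) pstart cfactor cfw demand big
        duration n.toNat 0 _ hinv]
    rw [show (0 : Int) + (n.toNat : Int) = n by omega]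
    simp

-- ===== VERDICT (by name: the statement is the Claim_ definition above) =====
theorem data_preprocessing_spec : Claim_equal_data_preprocessing := by
  intro num_intervals num_tasks prices_day earliest_starts latest_ends durations
    preferred_starts care_factors demands cf_weight cf_max _ _
  unfold Spec_data_preprocessing data_preprocessing data_preprocessing_alt
  rw [PySem.List.foldl_append_singleton_eq_map]
  simp only [List.nil_append]
  apply List.map_congr_left
  intro i _
  exact pv_row_eq prices_day num_intervals _ _ _ _ cf_weight _ _ _
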